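-- pv_equiv track=rewrite | github.com/queball1999/QSnippet | tests/utils/benchmark_trie_test.py | naive_match_suffix
-- ===== SOURCE A (Python) =====
-- def naive_match_suffix(buffer: str, triggers: list[str], max_trigger_len: int) -> str | None:
--     suffix = buffer[-max_trigger_len:]
--     best_match = None
--     for trigger in triggers:
--         if suffix.endswith(trigger):
--             if best_match is None or len(trigger) > len(best_match):
--                 best_match = trigger
--     return best_match
-- ===== SOURCE B (Python) =====
-- def naive_match_suffix(buffer: str, triggers: list[str], max_trigger_len: int) -> str | None:
--     suffix = buffer[-max_trigger_len:]
--     trigger_set = set(triggers)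
--     longest = 0
--     for t in triggers:
--         longest = max(longest, len(t))
--     for L in range(min(len(suffix), longest), -1, -1):
--         candidate = suffix[len(suffix) - L:]
--         if candidate in trigger_set:
--             return candidate
--     return None
-- ===== Notes on version B (the rewrite author's own statement) =====
-- stated objective: alternative
-- what changed: Instead of endswith-testing every trigger and tracking the longest match, B builds a set of the triggers once and walks candidate suffixes of the buffer tail from the longest trigger length down to 0, returning the first candidate found in the set.
import Mathlib
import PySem

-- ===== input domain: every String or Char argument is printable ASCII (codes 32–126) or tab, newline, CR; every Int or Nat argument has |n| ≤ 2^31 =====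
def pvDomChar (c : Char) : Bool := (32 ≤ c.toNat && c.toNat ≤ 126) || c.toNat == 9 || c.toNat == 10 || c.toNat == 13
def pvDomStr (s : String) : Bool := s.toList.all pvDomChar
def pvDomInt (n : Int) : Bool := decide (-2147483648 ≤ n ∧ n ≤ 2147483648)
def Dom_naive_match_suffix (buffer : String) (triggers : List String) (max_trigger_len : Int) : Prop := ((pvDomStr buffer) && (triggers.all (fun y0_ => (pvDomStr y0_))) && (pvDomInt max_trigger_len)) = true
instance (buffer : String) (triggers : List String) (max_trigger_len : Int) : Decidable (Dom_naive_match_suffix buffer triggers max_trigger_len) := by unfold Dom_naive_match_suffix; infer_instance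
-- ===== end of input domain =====

-- B replaces A's scan over all triggers (endswith + longest-so-far tracking) by a set of
-- triggers queried once per candidate suffix, walked from longest to shortest (objective: alternative).

-- ===== PORT A =====
def naive_match_suffix (buffer : String) (triggers : List String) (max_trigger_len : Int) : Option String :=
  let suffix := PySem.Str.slice buffer (some (-max_trigger_len)) none
  triggers.foldl (fun best_match trigger =>
    if PySem.Str.endswith suffix trigger then
      match best_match with
      | none => some trigger
      | some b => if PySem.Str.len trigger > PySem.Str.len b then some trigger else best_match
    else best_match) none

-- ===== PORT B =====
-- the 'for L in range(len(suffix), -1, -1): … return candidate' loop of Source B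
def pvAltLoop (suffix : String) (trigger_set : PySem.Set String) (L : Nat) : Option String :=
  let candidate := PySem.Str.slice suffix (some (PySem.Str.len suffix - (L : Int))) none
  if PySem.Set.contains trigger_set candidate then some candidate
  else
    match L with
    | 0 => none
    | L' + 1 => pvAltLoop suffix trigger_set L'

def naive_match_suffix_alt (buffer : String) (triggers : List String) (max_trigger_len : Int) : Option String :=
  let suffix := PySem.Str.slice buffer (some (-max_trigger_len)) none
  let trigger_set := PySem.Set.ofList triggers
  let longest := triggers.foldl (fun longest t => max longest (PySem.Str.len t)) 0
  pvAltLoop suffix trigger_set (min (PySem.Str.len suffix) longest).toNat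

-- ===== PRECONDITION & SPEC =====
def Spec_naive_match_suffix (buffer : String) (triggers : List String) (max_trigger_len : Int) (out : Option String) : Prop := out = naive_match_suffix_alt buffer triggers max_trigger_len
instance (buffer : String) (triggers : List String) (max_trigger_len : Int) (out : Option String) : Decidable (Spec_naive_match_suffix buffer triggers max_trigger_len out) := by unfold Spec_naive_match_suffix; infer_instance

-- ===== CLAIM (what is proved, stated in full; the proofs are below) =====
def Claim_equal_naive_match_suffix : Prop := ∀ (buffer : String) (triggers : List String) (max_trigger_len : Int), Dom_naive_match_suffix buffer triggers max_trigger_len → Spec_naive_match_suffix buffer triggers max_trigger_len (naive_match_suffix buffer triggers max_trigger_len)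

-- ===== LEMMAS AND PROOFS =====

-- A's loop body, as a named function (definitionally the lambda in the port)
def pvStep (suffix : String) (best_match : Option String) (trigger : String) : Option String :=
  if PySem.Str.endswith suffix trigger then
    match best_match with
    | none => some trigger
    | some b => if PySem.Str.len trigger > PySem.Str.len b then some trigger else best_match
  else best_match

-- B's candidate of length M (for M ≤ len suffix)
def pvCand (suffix : String) (M : Nat) : String :=
  PySem.Str.slice suffix (some (PySem.Str.len suffix - (M : Int))) none

lemma pvLen_eq (t : String) : PySem.Str.len t = (t.toList.length : Int) := by
  simp [pysem]

lemma pvCand_toList (s : String) (M : Nat) (hM : M ≤ s.toList.length) :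
    (pvCand s M).toList = s.toList.drop (s.toList.length - M) := by
  unfold pvCand
  have h : PySem.Str.len s - (M : Int) = ((s.toList.length - M : Nat) : Int) := by
    rw [pvLen_eq]; omega
  rw [h]
  simp [pysem]

lemma pvCand_suffix (s : String) (M : Nat) (hM : M ≤ s.toList.length) :
    (pvCand s M).toList <:+ s.toList := by
  rw [pvCand_toList s M hM]; exact List.drop_suffix _ _

lemma pvCand_len (s : String) (M : Nat) (h : M ≤ s.toList.length) :
    (pvCand s M).toList.length = M := by
  rw [pvCand_toList s M h, List.length_drop]; omega

lemma pvSuffix_eq_drop {l t : List Char} (h : l <:+ t) : l = t.drop (t.length - l.length) := by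
  obtain ⟨p, rfl⟩ := h; simp

lemma pvEndswith_iff (s t : String) :
    PySem.Str.endswith s t = true ↔ t.toList <:+ s.toList := by
  rw [PySem.Str.endswith_eq]; exact PySem.Chars.endswith_iff _ _

lemma pvStep_none (s t : String) :
    pvStep s none t = if PySem.Str.endswith s t then some t else none := rfl

lemma pvStep_some (s t b : String) :
    pvStep s (some b) t =
      if PySem.Str.endswith s t then
        (if PySem.Str.len t > PySem.Str.len b then some t else some b)
      else some b := rfl

lemma pvStep_suffix (s : String) (acc : Option String) (t a : String)
    (h : pvStep s acc t = some a) :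
    (acc = some a) ∨ (a = t ∧ t.toList <:+ s.toList) := by
  by_cases he : PySem.Str.endswith s t = true
  · cases acc with
    | none =>
      rw [pvStep_none, if_pos he] at h
      exact Or.inr ⟨(Option.some.inj h).symm, (pvEndswith_iff s t).mp he⟩
    | some b =>
      rw [pvStep_some, if_pos he] at h
      by_cases hl : PySem.Str.len t > PySem.Str.len b
      · rw [if_pos hl] at h
        exact Or.inr ⟨(Option.some.inj h).symm, (pvEndswith_iff s t).mp he⟩
      · rw [if_neg hl] at h
        exact Or.inl h
  · cases acc with
    | none => rw [pvStep_none, if_neg he] at h; exact absurd h (by simp)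
    | some b => rw [pvStep_some, if_neg he] at h; exact Or.inl h

lemma pvStep_mono (s : String) (acc : Option String) (t b : String)
    (h : acc = some b) :
    ∃ c, pvStep s acc t = some c ∧ PySem.Str.len b ≤ PySem.Str.len c := by
  subst h
  by_cases he : PySem.Str.endswith s t = true
  · by_cases hl : PySem.Str.len t > PySem.Str.len b
    · exact ⟨t, by rw [pvStep_some, if_pos he, if_pos hl], le_of_lt hl⟩
    · exact ⟨b, by rw [pvStep_some, if_pos he, if_neg hl], le_refl _⟩
  · exact ⟨b, by rw [pvStep_some, if_neg he], le_refl _⟩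

lemma pvStep_dominates (s : String) (acc : Option String) (t : String)
    (h : t.toList <:+ s.toList) :
    ∃ c, pvStep s acc t = some c ∧ PySem.Str.len t ≤ PySem.Str.len c := by
  have he : PySem.Str.endswith s t = true := (pvEndswith_iff s t).mpr h
  cases acc with
  | none => exact ⟨t, by rw [pvStep_none, if_pos he], le_refl _⟩
  | some b =>
    by_cases hl : PySem.Str.len t > PySem.Str.len b
    · exact ⟨t, by rw [pvStep_some, if_pos he, if_pos hl], le_refl _⟩
    · exact ⟨b, by rw [pvStep_some, if_pos he, if_neg hl], by omega⟩

-- characterization of A's fold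
lemma pvFoldA_char (s : String) (ts : List String) (acc : Option String) :
    (∀ a, ts.foldl (pvStep s) acc = some a →
        (acc = some a ∨ (a ∈ ts ∧ a.toList <:+ s.toList)))
    ∧ (∀ u ∈ ts, u.toList <:+ s.toList →
        ∃ a, ts.foldl (pvStep s) acc = some a ∧ PySem.Str.len u ≤ PySem.Str.len a)
    ∧ (∀ b, acc = some b →
        ∃ a, ts.foldl (pvStep s) acc = some a ∧ PySem.Str.len b ≤ PySem.Str.len a) := by
  induction ts generalizing acc with
  | nil =>
    refine ⟨fun a h => Or.inl h, fun u hu => absurd hu (List.not_mem_nil), ?_⟩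
    intro b hb; exact ⟨b, hb, le_refl _⟩
  | cons t ts ih =>
    obtain ⟨ih1, ih2, ih3⟩ := ih (pvStep s acc t)
    refine ⟨?_, ?_, ?_⟩
    · intro a h
      rcases ih1 a h with h' | h'
      · rcases pvStep_suffix s acc t a h' with h'' | ⟨rfl, hs⟩
        · exact Or.inl h''
        · exact Or.inr ⟨List.mem_cons_self, hs⟩
      · exact Or.inr ⟨List.mem_cons_of_mem _ h'.1, h'.2⟩
    · intro u hu hsuf
      rcases List.mem_cons.mp hu with rfl | hu'
      · obtain ⟨c, hc, hlen⟩ := pvStep_dominates s acc u hsuf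
        obtain ⟨a, ha, hlen'⟩ := ih3 c hc
        exact ⟨a, ha, le_trans hlen hlen'⟩
      · exact ih2 u hu' hsuf
    · intro b hb
      obtain ⟨c, hc, hlen⟩ := pvStep_mono s acc t b hb
      obtain ⟨a, ha, hlen'⟩ := ih3 c hc
      exact ⟨a, ha, le_trans hlen hlen'⟩

lemma pvContains_ofList (xs : List String) (x : String) :
    PySem.Set.contains (PySem.Set.ofList xs) x = true ↔ x ∈ xs := by
  simp [pysem]

-- unfold one step of B's loop
lemma pvAltLoop_eq (s : String) (tset : PySem.Set String) (L : Nat) :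
    pvAltLoop s tset L =
      if PySem.Set.contains tset (pvCand s L) then some (pvCand s L)
      else match L with
           | 0 => none
           | L' + 1 => pvAltLoop s tset L' := by
  cases L <;> rfl

lemma pvAltLoop_none (s : String) (triggers : List String) (L : Nat)
    (h : ∀ M, M ≤ L → pvCand s M ∉ triggers) :
    pvAltLoop s (PySem.Set.ofList triggers) L = none := by
  induction L with
  | zero =>
    rw [pvAltLoop_eq]
    rw [if_neg]
    simp only [pvContains_ofList]
    exact h 0 (le_refl _)
  | succ L ih =>
    rw [pvAltLoop_eq]
    rw [if_neg]
    · exact ih (fun M hM => h M (le_trans hM (Nat.le_succ _)))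
    · simp only [pvContains_ofList]
      exact h (L + 1) (le_refl _)

lemma pvAltLoop_found (s : String) (triggers : List String) (L M : Nat)
    (hM : M ≤ L)
    (hmem : pvCand s M ∈ triggers)
    (habove : ∀ M', M < M' → M' ≤ L → pvCand s M' ∉ triggers) :
    pvAltLoop s (PySem.Set.ofList triggers) L = some (pvCand s M) := by
  induction L with
  | zero =>
    interval_cases M
    rw [pvAltLoop_eq, if_pos]
    simpa only [pvContains_ofList] using hmem
  | succ L ih =>
    rcases Nat.lt_or_ge M (L + 1) with hlt | hge
    · rw [pvAltLoop_eq, if_neg]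
      · exact ih (by omega) (fun M' h1 h2 => habove M' h1 (by omega))
      · simp only [pvContains_ofList]
        exact habove (L + 1) (by omega) (le_refl _)
    · have : M = L + 1 := by omega
      subst this
      rw [pvAltLoop_eq, if_pos]
      simpa only [pvContains_ofList] using hmem

-- each trigger's length is bounded by the fold computing `longest`
lemma pvLe_longest (ts : List String) (acc : Int) :
    (∀ u ∈ ts, PySem.Str.len u ≤ ts.foldl (fun longest t => max longest (PySem.Str.len t)) acc)
    ∧ acc ≤ ts.foldl (fun longest t => max longest (PySem.Str.len t)) acc := by
  induction ts generalizing acc with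
  | nil => exact ⟨fun u hu => absurd hu (List.not_mem_nil), le_refl _⟩
  | cons t ts ih =>
    obtain ⟨ih1, ih2⟩ := ih (max acc (PySem.Str.len t))
    refine ⟨?_, le_trans (le_max_left _ _) ih2⟩
    intro u hu
    rcases List.mem_cons.mp hu with rfl | hu'
    · exact le_trans (le_max_right _ _) ih2
    · exact ih1 u hu'

-- the main equivalence, over an arbitrary shared suffix string
lemma pvMain (s : String) (triggers : List String) :
    triggers.foldl (pvStep s) none =
      pvAltLoop s (PySem.Set.ofList triggers)
        (min (PySem.Str.len s)
          (triggers.foldl (fun longest t => max longest (PySem.Str.len t)) 0)).toNat := by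
  obtain ⟨h1, h2, _⟩ := pvFoldA_char s triggers none
  have hlen_s : PySem.Str.len s = (s.toList.length : Int) := pvLen_eq s
  have hlong0 : (0 : Int) ≤ triggers.foldl (fun longest t => max longest (PySem.Str.len t)) 0 :=
    (pvLe_longest triggers 0).2
  have hU : (min (PySem.Str.len s)
      (triggers.foldl (fun longest t => max longest (PySem.Str.len t)) 0)).toNat
      ≤ s.toList.length := by
    rw [hlen_s] at *; omega
  by_cases hex : ∃ u ∈ triggers, u.toList <:+ s.toList
  · obtain ⟨u, hu, hsuf⟩ := hex
    obtain ⟨a, ha, _⟩ := h2 u hu hsuf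
    have hach : a ∈ triggers ∧ a.toList <:+ s.toList := by
      rcases h1 a ha with h | h
      · exact absurd h (by simp)
      · exact h
    obtain ⟨hamem, hasuf⟩ := hach
    have hMn : a.toList.length ≤ s.toList.length := hasuf.length_le
    have hMlong : (a.toList.length : Int) ≤
        triggers.foldl (fun longest t => max longest (PySem.Str.len t)) 0 := by
      have := (pvLe_longest triggers 0).1 a hamem
      rwa [pvLen_eq] at this
    have hMU : a.toList.length ≤ (min (PySem.Str.len s)
        (triggers.foldl (fun longest t => max longest (PySem.Str.len t)) 0)).toNat := by
      rw [hlen_s] at *; omega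
    have haeq : a = pvCand s a.toList.length := by
      apply String.toList_inj.mp
      rw [pvCand_toList s a.toList.length hMn]
      exact pvSuffix_eq_drop hasuf
    have habove : ∀ M', a.toList.length < M' → M' ≤ (min (PySem.Str.len s)
        (triggers.foldl (fun longest t => max longest (PySem.Str.len t)) 0)).toNat →
        pvCand s M' ∉ triggers := by
      intro M' h1' h2' hmem
      have h2'' : M' ≤ s.toList.length := le_trans h2' hU
      obtain ⟨a', ha', hlen'⟩ := h2 (pvCand s M') hmem (pvCand_suffix s M' h2'')
      have : a' = a := by rw [ha] at ha'; exact (Option.some.inj ha').symm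
      subst this
      rw [pvLen_eq, pvLen_eq] at hlen'
      rw [pvCand_len s M' h2''] at hlen'
      omega
    have hmem' : pvCand s a.toList.length ∈ triggers := by rw [← haeq]; exact hamem
    rw [ha, haeq]
    exact (pvAltLoop_found s triggers _ _ hMU hmem' habove).symm
  · have hex' : ∀ u ∈ triggers, ¬ u.toList <:+ s.toList :=
      fun u hu hs => hex ⟨u, hu, hs⟩
    have hnone : triggers.foldl (pvStep s) none = none := by
      cases h : triggers.foldl (pvStep s) none with
      | none => rfl
      | some a =>
        rcases h1 a h with h' | h'
        · exact absurd h' (by simp)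
        · exact absurd h'.2 (hex' a h'.1)
    rw [hnone]
    exact (pvAltLoop_none s triggers _ (fun M hM hmem =>
      (hex' _ hmem) (pvCand_suffix s M (le_trans hM hU)))).symm

-- ===== VERDICT (by name: the statement is the Claim_ definition above) =====
theorem naive_match_suffix_spec : Claim_equal_naive_match_suffix := by
  intro buffer triggers max_trigger_len _
  unfold Spec_naive_match_suffix naive_match_suffix naive_match_suffix_alt
  exact pvMain _ triggers
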